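-- pv_equiv track=rewrite | github.com/Yuan98Yu/seu_lex | code/reparser/NFA2DFA.py | __find_actions
-- ===== SOURCE A (Python) =====
-- def __find_actions(NFAstates_in_DFAstate, endStates_in_NFA):
--     endState_number = -1
--     actions = -1
--     find = False
--     for NFA_state_number in NFAstates_in_DFAstate:
--         if NFA_state_number in endStates_in_NFA.keys():
--             if find:
--                 if endState_number > NFA_state_number:
--                     endState_number = NFA_state_number
--             else:
--                 endState_number = NFA_state_number
--                 find = True
--     if find:
--         actions = endStates_in_NFA[endState_number]
--     return actions
-- ===== SOURCE B (Python) =====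
-- def __find_actions(NFAstates_in_DFAstate, endStates_in_NFA):
--     states = set(NFAstates_in_DFAstate)
--     for end_state in sorted(endStates_in_NFA):
--         if end_state in states:
--             return endStates_in_NFA[end_state]
--     return -1
-- ===== Notes on version B (the rewrite author's own statement) =====
-- stated objective: alternative
-- what changed: Instead of A's single pass over the DFA-state list with a running-minimum accumulator and a 'find' flag, B inverts the traversal: it builds a set of the DFA states, sorts the dict's end-state keys, and scans the sorted keys returning the value of the first key that lies in the set (early exit), -1 if none does.
import Mathlib
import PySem

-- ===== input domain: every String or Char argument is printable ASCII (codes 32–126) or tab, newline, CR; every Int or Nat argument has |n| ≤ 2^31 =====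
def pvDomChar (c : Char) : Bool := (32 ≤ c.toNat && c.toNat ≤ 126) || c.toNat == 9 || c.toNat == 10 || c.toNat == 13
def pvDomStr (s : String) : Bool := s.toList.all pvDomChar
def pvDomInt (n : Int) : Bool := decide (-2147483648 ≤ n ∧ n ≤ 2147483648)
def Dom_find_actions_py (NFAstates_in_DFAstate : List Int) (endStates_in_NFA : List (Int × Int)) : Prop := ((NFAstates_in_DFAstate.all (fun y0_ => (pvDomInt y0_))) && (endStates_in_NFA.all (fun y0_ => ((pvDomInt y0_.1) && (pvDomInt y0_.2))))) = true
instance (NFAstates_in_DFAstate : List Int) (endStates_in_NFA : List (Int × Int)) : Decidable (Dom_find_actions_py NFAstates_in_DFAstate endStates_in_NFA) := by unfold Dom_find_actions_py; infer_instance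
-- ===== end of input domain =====

-- B replaces A's single pass over the DFA-state list (running-minimum accumulator plus
-- a 'find' flag) by the inverse traversal: sort the dict's end-state keys and return the
-- value of the first sorted key contained in a set of the DFA states (objective: alternative).


-- ===== PORT A =====
-- Loop state (endState_number, find); 'actions' is only set after the loop, so it is
-- realised as the final 'if'. The Python dict is PySem.Dict.ofList of the pair list.
def find_actions_py (NFAstates_in_DFAstate : List Int) (endStates_in_NFA : List (Int × Int)) : Int :=
  let d := PySem.Dict.ofList endStates_in_NFA
  let st := NFAstates_in_DFAstate.foldl
    (fun (st : Int × Bool) s =>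
      if d.contains s then
        if st.2 then
          (if st.1 > s then (s, st.2) else st)
        else (s, true)
      else st) (-1, false)
  if st.2 then d.getD st.1 (-1) else -1

-- ===== PORT B =====
-- set(...) is PySem.Set.ofList; sorted(dict) is sorted over the keys; the early-return
-- for loop over the sorted keys is List.find?.
def find_actions_py_alt (NFAstates_in_DFAstate : List Int) (endStates_in_NFA : List (Int × Int)) : Int :=
  let d := PySem.Dict.ofList endStates_in_NFA
  let states := PySem.Set.ofList NFAstates_in_DFAstate
  match (PySem.List.sorted d.keys (fun k => k) false).find? (fun k => PySem.Set.contains states k) with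
  | some k => d.getD k (-1)
  | none => -1

-- ===== PRECONDITION & SPEC =====
def Spec_find_actions_py (NFAstates_in_DFAstate : List Int) (endStates_in_NFA : List (Int × Int)) (out : Int) : Prop := out = find_actions_py_alt NFAstates_in_DFAstate endStates_in_NFA
instance (NFAstates_in_DFAstate : List Int) (endStates_in_NFA : List (Int × Int)) (out : Int) : Decidable (Spec_find_actions_py NFAstates_in_DFAstate endStates_in_NFA out) := by unfold Spec_find_actions_py; infer_instance

-- ===== CLAIM =====
def Claim_equal_find_actions_py : Prop := ∀ (NFAstates_in_DFAstate : List Int) (endStates_in_NFA : List (Int × Int)), Dom_find_actions_py NFAstates_in_DFAstate endStates_in_NFA → Spec_find_actions_py NFAstates_in_DFAstate endStates_in_NFA (find_actions_py NFAstates_in_DFAstate endStates_in_NFA)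

-- ===== LEMMAS AND PROOFS =====

-- A's loop, once 'find' is true with current minimum e, computes the running min over the filtered tail.
theorem pvA_loop_true (p : Int → Bool) (xs : List Int) (e : Int) :
    xs.foldl (fun (st : Int × Bool) s =>
      if p s then
        if st.2 then (if st.1 > s then (s, st.2) else st) else (s, true)
      else st) (e, true)
    = ((xs.filter p).foldl min e, true) := by
  induction xs generalizing e with
  | nil => rfl
  | cons x t ih =>
    by_cases hx : p x
    · by_cases h : e > x
      · have hmin : min e x = x := by omega
        simp [hx, h, ih, hmin]
      · have hmin : min e x = e := by omega
        simp [hx, h, ih, hmin]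
    · simp [hx, ih]

-- A's loop from the initial (-1, false) state, characterised by the filtered list.
theorem pvA_loop_false (p : Int → Bool) (xs : List Int) :
    xs.foldl (fun (st : Int × Bool) s =>
      if p s then
        if st.2 then (if st.1 > s then (s, st.2) else st) else (s, true)
      else st) (-1, false)
    = (match xs.filter p with
       | [] => ((-1 : Int), false)
       | h :: t => (t.foldl min h, true)) := by
  induction xs with
  | nil => rfl
  | cons x t ih =>
    by_cases hx : p x
    · simp [hx, pvA_loop_true]
    · simp [hx, ih]

-- On a strictly increasing list, find? returns the minimum of the elements satisfying q.
theorem pvFind?_of_min (l : List Int) (q : Int → Bool) (hp : l.Pairwise (· < ·))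
    (M : Int) (hM : M ∈ l) (hq : q M = true) (hmin : ∀ y ∈ l, q y = true → M ≤ y) :
    l.find? q = some M := by
  induction l with
  | nil => cases hM
  | cons x t ih =>
    by_cases hx : q x = true
    · have hxM : M ≤ x := hmin x (List.mem_cons_self) hx
      have : M = x := by
        rcases List.mem_cons.mp hM with h | h
        · exact h
        · exact absurd ((List.pairwise_cons.mp hp).1 M h) (by omega)
      simp [hx, this]
    · have hMx : M ≠ x := fun h => hx (h ▸ hq)
      have hMt : M ∈ t := by
        rcases List.mem_cons.mp hM with h | h
        · exact absurd h hMx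
        · exact h
      have := ih (List.pairwise_cons.mp hp).2 hMt
        (fun y hy hqy => hmin y (List.mem_cons_of_mem _ hy) hqy)
      simp [hx, this]

-- The sorted key list of an ofList dict is strictly increasing.
theorem pvSortedKeys_lt (d : PySem.Dict Int Int) (hnd : d.keys.Nodup) :
    (PySem.List.sorted d.keys (fun k => k) false).Pairwise (· < ·) := by
  have hle := PySem.List.sorted_pairwise d.keys (fun k => k)
  have hperm : (PySem.List.sorted d.keys (fun k => k) false).Perm d.keys :=
    PySem.List.sorted_perm _ _ _
  have hnd' : (PySem.List.sorted d.keys (fun k => k) false).Nodup :=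
    (hperm.nodup_iff).mpr hnd
  have := List.Pairwise.and hle hnd'
  exact this.imp (fun h => by omega)

-- ===== VERDICT =====
theorem find_actions_py_spec : Claim_equal_find_actions_py := by
  intro xs es _
  unfold Spec_find_actions_py find_actions_py find_actions_py_alt
  simp only [pvA_loop_false]
  set d := PySem.Dict.ofList es with hd
  have hnd : d.keys.Nodup := PySem.Dict.nodup_keys_ofList es
  have hcontains : ∀ k : Int, PySem.Set.contains (PySem.Set.ofList xs) k = true ↔ k ∈ xs := by
    intro k
    rw [PySem.Set.contains_iff, PySem.Set.mem_ofList]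
  cases hf : xs.filter (fun s => d.contains s) with
  | nil =>
    have hnone : (PySem.List.sorted d.keys (fun k => k) false).find?
        (fun k => PySem.Set.contains (PySem.Set.ofList xs) k) = none := by
      apply List.find?_eq_none.mpr
      intro k hk hc
      have hkx : k ∈ xs := (hcontains k).mp hc
      have hkd : d.contains k = true :=
        (PySem.Dict.contains_iff_mem_keys d k).mpr ((PySem.List.mem_sorted _ _ _ k).mp hk)
      have : k ∈ xs.filter (fun s => d.contains s) := List.mem_filter.mpr ⟨hkx, hkd⟩
      rw [hf] at this; cases this
    simp only [hnone]
    simp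
  | cons h t =>
    set M := t.foldl min h with hM
    have hmin? : PySem.List.min? (h :: t) (fun y => y) = some M :=
      PySem.List.min?_id_cons h t
    have hMmem : M ∈ h :: t := PySem.List.min?_mem hmin?
    have hMisMin : ∀ y ∈ h :: t, M ≤ y := by
      have := PySem.List.min?_isMin hmin?
      simpa using this
    have hMf : M ∈ xs.filter (fun s => d.contains s) := hf ▸ hMmem
    have hMxs : M ∈ xs := (List.mem_filter.mp hMf).1
    have hMd : d.contains M = true := (List.mem_filter.mp hMf).2
    have hfind : (PySem.List.sorted d.keys (fun k => k) false).find?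
        (fun k => PySem.Set.contains (PySem.Set.ofList xs) k) = some M := by
      apply pvFind?_of_min _ _ (pvSortedKeys_lt d hnd)
      · exact (PySem.List.mem_sorted _ _ _ M).mpr ((PySem.Dict.contains_iff_mem_keys d M).mp hMd)
      · exact (hcontains M).mpr hMxs
      · intro y hy hqy
        have hyx : y ∈ xs := (hcontains y).mp hqy
        have hyd : d.contains y = true :=
          (PySem.Dict.contains_iff_mem_keys d y).mpr ((PySem.List.mem_sorted _ _ _ y).mp hy)
        have : y ∈ xs.filter (fun s => d.contains s) := List.mem_filter.mpr ⟨hyx, hyd⟩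
        exact hMisMin y (hf ▸ this)
    simp only [hfind]
    simp [hM]
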